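-- pv_equiv track=rewrite | github.com/lucliu20/LeetCode-Medium | 1953-Maximum Number of Weeks for Which You Can Work.py | numberOfWeeks
-- ===== SOURCE A (Python) =====
-- from typing import List
--
-- def numberOfWeeks(milestones: List[int]) -> int:
--     res, diff, reminder = 0, 0, True
--     milestones.sort(reverse=True)
--     while len(milestones) > 1:
--         m0, m1 = milestones.pop(0), milestones.pop(0)
--         if m0 > m1:
--             diff = m0 - m1 - 1
--             res += 2 * m1 + 1
--             if diff != 0:
--                 milestones.insert(0, diff)
--                 reminder = False
--         elif m0 < m1:
--             diff = m1 - m0 - 1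
--             res += 2 * m0 + 1
--             if diff != 0:
--                 milestones.insert(0, diff)
--                 reminder = True
--         elif m0 == m1:
--             diff = 0
--             res += 2 * m1
--     if reminder == True:
--         if len(milestones) > 0 and milestones[0] != 0:
--             res += 1
--     return res
-- ===== SOURCE B (Python) =====
-- from typing import List
--
-- def numberOfWeeks(milestones: List[int]) -> int:
--     # Single fold over the sorted-descending values with an Option-style carry;
--     # does not mutate the input (A sorts and empties it; return value only).
--     res = 0
--     reminder = True
--     carry = None
--     for x in sorted(milestones, reverse=True):
--         if carry is None:
--             carry = x
--         elif carry > x: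
--             res += 2 * x + 1
--             d = carry - x - 1
--             if d != 0:
--                 carry = d
--                 reminder = False
--             else:
--                 carry = None
--         elif carry < x:
--             res += 2 * carry + 1
--             d = x - carry - 1
--             if d != 0:
--                 carry = d
--                 reminder = True
--             else:
--                 carry = None
--         else:
--             res += 2 * x
--             carry = None
--     if reminder and carry is not None and carry != 0:
--         res += 1
--     return res
-- ===== Notes on version B (the rewrite author's own statement) =====
-- stated objective: faster
-- what changed: A's mutating simulation (repeated pop(0)/insert(0) on the sorted list) is replaced by one non-mutating fold over sorted(milestones, reverse=True) carrying (res, optional carry, reminder); B does not mutate the caller's list, unlike A (return value equivalence only).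
import Mathlib
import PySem

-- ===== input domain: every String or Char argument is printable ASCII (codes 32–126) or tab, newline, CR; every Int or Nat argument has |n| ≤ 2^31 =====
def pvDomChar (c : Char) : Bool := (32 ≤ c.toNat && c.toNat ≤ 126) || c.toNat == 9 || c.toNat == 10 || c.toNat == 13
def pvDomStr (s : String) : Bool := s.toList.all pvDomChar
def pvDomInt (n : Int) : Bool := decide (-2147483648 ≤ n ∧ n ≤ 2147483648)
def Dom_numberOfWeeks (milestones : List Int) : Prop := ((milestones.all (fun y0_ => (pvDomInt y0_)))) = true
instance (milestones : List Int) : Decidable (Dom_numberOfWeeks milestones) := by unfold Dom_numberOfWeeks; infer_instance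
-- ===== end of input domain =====

-- B replaces A's mutating pop(0)/insert(0) simulation by one fold over the sorted list with an
-- Option carry (A sorts/empties its argument in place; equivalence is about the RETURN value only).


-- ===== PORT A =====
-- the while-loop: pops two front elements, maybe re-inserts the diff at the front.
-- fuel is only a totality guard: each iteration removes at least one element, so
-- fuel = length of the list is always enough and the 0-fuel branch is never reached.
def aLoop (fuel : Nat) (ms : List Int) (res : Int) (reminder : Bool) : Int × List Int × Bool :=
  match fuel with
  | 0 => (res, ms, reminder)
  | fuel + 1 =>
    match ms with
    | m0 :: m1 :: rest =>
      if m0 > m1 then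
        let diff := m0 - m1 - 1
        let res := res + 2 * m1 + 1
        if diff ≠ 0 then aLoop fuel (diff :: rest) res false
        else aLoop fuel rest res reminder
      else if m0 < m1 then
        let diff := m1 - m0 - 1
        let res := res + 2 * m0 + 1
        if diff ≠ 0 then aLoop fuel (diff :: rest) res true
        else aLoop fuel rest res reminder
      else aLoop fuel rest (res + 2 * m1) reminder
    | _ => (res, ms, reminder)

def numberOfWeeks (milestones : List Int) : Int :=
  let ms := PySem.List.sorted milestones (fun x => x) true
  let r := aLoop ms.length ms 0 true
  if r.2.2 = true then
    match r.2.1 with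
    | x :: _ => if x ≠ 0 then r.1 + 1 else r.1
    | [] => r.1
  else r.1

-- ===== PORT B =====
-- B's fold step: state = (res, optional carry, reminder)
def bStep (s : Int × Option Int × Bool) (x : Int) : Int × Option Int × Bool :=
  match s with
  | (res, none, rem) => (res, some x, rem)
  | (res, some c, rem) =>
    if c > x then
      let d := c - x - 1
      if d ≠ 0 then (res + 2 * x + 1, some d, false) else (res + 2 * x + 1, none, rem)
    else if c < x then
      let d := x - c - 1
      if d ≠ 0 then (res + 2 * c + 1, some d, true) else (res + 2 * c + 1, none, rem)
    else (res + 2 * x, none, rem)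

def numberOfWeeks_alt (milestones : List Int) : Int :=
  let r := (PySem.List.sorted milestones (fun x => x) true).foldl bStep (0, none, true)
  match r with
  | (res, some c, true) => if c ≠ 0 then res + 1 else res
  | (res, _, _) => res

-- ===== PRECONDITION & SPEC =====
def Spec_numberOfWeeks (milestones : List Int) (out : Int) : Prop := out = numberOfWeeks_alt milestones
instance (milestones : List Int) (out : Int) : Decidable (Spec_numberOfWeeks milestones out) := by unfold Spec_numberOfWeeks; infer_instance

-- ===== CLAIM (what is proved, stated in full; the proofs are below) =====
def Claim_equal_numberOfWeeks : Prop := ∀ (milestones : List Int), Dom_numberOfWeeks milestones → Spec_numberOfWeeks milestones (numberOfWeeks milestones)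

-- ===== LEMMAS AND PROOFS =====

def optList : Option Int → List Int
  | some c => [c]
  | none => []

-- the fold with carry simulates A's loop on (carry ++ rest) given enough fuel;
-- only the head of the leftover list matters
theorem bFold_eq_aLoop : ∀ (ms : List Int) (res : Int) (co : Option Int) (rem : Bool)
    (fuel : Nat), (optList co ++ ms).length ≤ fuel →
    ms.foldl bStep (res, co, rem)
      = ((aLoop fuel (optList co ++ ms) res rem).1,
         (aLoop fuel (optList co ++ ms) res rem).2.1.head?,
         (aLoop fuel (optList co ++ ms) res rem).2.2)
  | [], res, co, rem, fuel, _ => by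
      cases co <;> cases fuel <;> simp [aLoop, optList]
  | x :: t, res, none, rem, fuel, h => by
      simpa [optList, bStep] using
        bFold_eq_aLoop t res (some x) rem fuel (by simpa [optList] using h)
  | x :: t, res, some c, rem, fuel, h => by
      match fuel with
      | 0 => exact absurd h (by simp [optList])
      | fuel + 1 =>
        simp only [optList, List.cons_append, List.nil_append, List.foldl_cons]
        rw [aLoop]
        have ht : t.length + 1 ≤ fuel := by
          simpa [optList] using h
        by_cases h1 : c > x
        · by_cases h2 : c - x - 1 ≠ 0 <;>
            simp only [h1, h2, if_pos, bStep, if_false]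
          · simpa [bStep, h1, h2, optList] using
              bFold_eq_aLoop t (res + 2 * x + 1) (some (c - x - 1)) false fuel (by simp [optList]; omega)
          · simpa [bStep, h1, h2, optList] using
              bFold_eq_aLoop t (res + 2 * x + 1) none rem fuel (by simp [optList]; omega)
        · by_cases h3 : c < x
          · by_cases h2 : x - c - 1 ≠ 0
            · simpa [bStep, h1, h3, h2, optList] using
                bFold_eq_aLoop t (res + 2 * c + 1) (some (x - c - 1)) true fuel (by simp [optList]; omega)
            · simpa [bStep, h1, h3, h2, optList] using
                bFold_eq_aLoop t (res + 2 * c + 1) none rem fuel (by simp [optList]; omega)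
          · simpa [bStep, h1, h3, optList, show c = x by omega] using
              bFold_eq_aLoop t (res + 2 * x) none rem fuel (by simp [optList]; omega)

theorem numberOfWeeks_spec : Claim_equal_numberOfWeeks := by
  intro ms _
  unfold Spec_numberOfWeeks numberOfWeeks numberOfWeeks_alt
  rw [bFold_eq_aLoop (PySem.List.sorted ms (fun x => x) true) 0 none true
      (PySem.List.sorted ms (fun x => x) true).length (by simp [optList])]
  simp only [optList, List.nil_append]
  generalize aLoop (PySem.List.sorted ms (fun x => x) true).length
      (PySem.List.sorted ms (fun x => x) true) 0 true = r
  obtain ⟨res, lst, rem⟩ := r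
  cases lst with
  | nil => cases rem <;> simp
  | cons x t => cases rem <;> by_cases hx : x = 0 <;> simp [hx]
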